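-- pv_equiv track=rewrite | github.com/TreestanG/glimpse | analysis_utils.py | count_filler_words
-- ===== SOURCE A (Python) =====
-- def count_filler_words(turns, filler_words=None):
--     if filler_words is None:
--         filler_words = {"um", "uh", "like", "you know", "so", "actually", "basically"}
--     count = 0
--     for turn in turns:
--         words = turn.lower().split()
--         count += sum(1 for w in words if w in filler_words)
--     return count
-- ===== SOURCE B (Python) =====
-- def count_filler_words(turns, filler_words=None):
--     if filler_words is None:
--         filler_words = {"um", "uh", "like", "you know", "so", "actually", "basically"}
--     tokens = sorted(w for turn in turns for w in turn.lower().split())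
--     fillers = sorted(set(filler_words))
--     total = i = j = 0
--     while i < len(tokens) and j < len(fillers):
--         if tokens[i] < fillers[j]:
--             i += 1
--         elif tokens[i] > fillers[j]:
--             j += 1
--         else:
--             total += 1
--             i += 1
--     return total
-- ===== Notes on version B (the rewrite author's own statement) =====
-- stated objective: alternative
-- what changed: B uses no membership test or hash at all: it sorts the flattened token list and the deduplicated filler vocabulary and counts matches with a two-pointer merge over the two sorted lists, instead of A's per-word set-membership scan.
import Mathlib
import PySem

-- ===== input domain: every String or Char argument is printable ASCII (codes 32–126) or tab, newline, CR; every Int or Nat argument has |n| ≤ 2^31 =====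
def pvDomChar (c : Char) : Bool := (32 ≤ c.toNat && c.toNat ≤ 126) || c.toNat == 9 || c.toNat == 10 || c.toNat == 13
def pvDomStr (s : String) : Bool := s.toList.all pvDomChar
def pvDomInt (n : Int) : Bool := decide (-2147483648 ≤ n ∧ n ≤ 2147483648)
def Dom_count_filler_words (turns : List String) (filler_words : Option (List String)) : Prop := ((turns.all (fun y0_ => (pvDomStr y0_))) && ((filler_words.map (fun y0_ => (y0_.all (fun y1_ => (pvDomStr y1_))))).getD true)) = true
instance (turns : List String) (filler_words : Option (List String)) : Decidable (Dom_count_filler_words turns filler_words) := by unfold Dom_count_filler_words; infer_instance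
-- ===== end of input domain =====

-- B replaces the per-word set-membership scan by sorting the flattened tokens and the deduplicated filler vocabulary and counting matches with a two-pointer merge (alternative algorithm).

def pvDefaultFillers : List String :=
  ["um", "uh", "like", "you know", "so", "actually", "basically"]

-- ===== PORT A =====
def count_filler_words (turns : List String) (filler_words : Option (List String)) : Int :=
  let filler : List String :=
    match filler_words with
    | none => PySem.Set.ofList pvDefaultFillers
    | some l => l
  turns.foldl
    (fun count turn =>
      let words := PySem.Str.split₀ (PySem.Str.lower turn)
      count + words.foldl (fun s w => if filler.contains w then s + 1 else s) 0)
    0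

-- ===== PORT B =====
-- the two-pointer while loop of Source B, consuming the two sorted lists from the front
def pvMergeCount : List String → List String → Int
  | [], _ => 0
  | _ :: _, [] => 0
  | t :: ts, f :: fs =>
    if t < f then pvMergeCount ts (f :: fs)
    else if f < t then pvMergeCount (t :: ts) fs
    else 1 + pvMergeCount ts (f :: fs)
termination_by ts fs => ts.length + fs.length
decreasing_by all_goals simp

def count_filler_words_alt (turns : List String) (filler_words : Option (List String)) : Int :=
  let filler : List String :=
    match filler_words with
    | none => PySem.Set.ofList pvDefaultFillers
    | some l => l
  let tokens : List String :=
    PySem.List.sorted (turns.flatMap (fun turn => PySem.Str.split₀ (PySem.Str.lower turn))) (fun x => x) false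
  let fillers : List String :=
    PySem.List.sorted (PySem.Set.ofList filler) (fun x => x) false
  pvMergeCount tokens fillers

-- ===== PRECONDITION & SPEC =====
def Spec_count_filler_words (turns : List String) (filler_words : Option (List String)) (out : Int) : Prop := out = count_filler_words_alt turns filler_words
instance (turns : List String) (filler_words : Option (List String)) (out : Int) : Decidable (Spec_count_filler_words turns filler_words out) := by unfold Spec_count_filler_words; infer_instance

-- ===== CLAIM (what is proved, stated in full; the proofs are below) =====
def Claim_equal_count_filler_words : Prop := ∀ (turns : List String) (filler_words : Option (List String)), Dom_count_filler_words turns filler_words → Spec_count_filler_words turns filler_words (count_filler_words turns filler_words)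

-- ===== LEMMAS AND PROOFS =====

-- the merge over a ≤-sorted token list and a <-sorted filler list counts the tokens that occur in the filler list
theorem pv_merge_countP (ts fs : List String)
    (hts : ts.Pairwise (· ≤ ·)) (hfs : fs.Pairwise (· < ·)) :
    pvMergeCount ts fs = (ts.countP (fun x => decide (x ∈ fs)) : Int) := by
  induction ts, fs using pvMergeCount.induct with
  | case1 fs => simp [pvMergeCount]
  | case2 t ts => simp [pvMergeCount]
  | case3 t ts f fs hlt ih =>
    -- t < f ≤ every element of f :: fs, so t ∉ f :: fs
    have hnot : ¬ t ∈ f :: fs := by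
      intro hmem
      rcases List.mem_cons.mp hmem with h | h
      · exact absurd h.symm (ne_of_gt hlt)
      · exact absurd rfl (ne_of_gt (lt_trans hlt ((List.pairwise_cons.mp hfs).1 _ h)))
    rw [pvMergeCount]
    simp only [if_pos hlt]
    rw [ih hts.of_cons hfs, List.countP_cons]
    simp [hnot]
  | case4 t ts f fs hnlt hgt ih =>
    -- f < t ≤ every element of t :: ts, so f matches nothing in t :: ts
    have hmemiff : ∀ x ∈ t :: ts, (x ∈ f :: fs ↔ x ∈ fs) := by
      intro x hx
      have hfx : f < x := by
        rcases List.mem_cons.mp hx with h | h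
        · exact h ▸ hgt
        · exact lt_of_lt_of_le hgt ((List.pairwise_cons.mp hts).1 _ h)
      constructor
      · intro h
        rcases List.mem_cons.mp h with h | h
        · exact absurd h (ne_of_gt hfx)
        · exact h
      · exact List.mem_cons_of_mem f
    rw [pvMergeCount]
    simp only [if_neg hnlt, if_pos hgt]
    rw [ih hts hfs.of_cons]
    congr 1
    exact_mod_cast (List.countP_congr (fun x hx => by simp [hmemiff x hx])).symm
  | case5 t ts f fs hnlt hngt ih =>
    have heq : t = f := le_antisymm (not_lt.mp hngt) (not_lt.mp hnlt)
    rw [pvMergeCount]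
    simp only [if_neg hnlt, if_neg hngt]
    rw [ih hts.of_cons hfs, List.countP_cons]
    have : t ∈ f :: fs := heq ▸ List.mem_cons_self
    simp [this]
    ring

theorem pv_sorted_set_pairwise_lt (l : List String) :
    (PySem.List.sorted (PySem.Set.ofList l) (fun x => x) false).Pairwise (· < ·) := by
  have hle := PySem.List.sorted_pairwise (xs := PySem.Set.ofList l) (key := fun x => x)
  have hnd : (PySem.List.sorted (PySem.Set.ofList l) (fun x => x) false).Nodup :=
    (PySem.List.sorted_perm (xs := PySem.Set.ofList l) (key := fun x => x) (rev := false)).nodup_iff.mpr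
      (PySem.Set.nodup_ofList l)
  exact (hle.and hnd).imp (fun h => lt_of_le_of_ne h.1 h.2)

theorem pv_main (filler turns : List String) :
    turns.foldl
      (fun count turn =>
        count + (PySem.Str.split₀ (PySem.Str.lower turn)).foldl
          (fun s w => if filler.contains w then s + 1 else s) 0)
      0
    = pvMergeCount
        (PySem.List.sorted (turns.flatMap (fun turn => PySem.Str.split₀ (PySem.Str.lower turn))) (fun x => x) false)
        (PySem.List.sorted (PySem.Set.ofList filler) (fun x => x) false) := by
  -- B side: merge = countP membership over the sorted tokens = countP over the flattened tokens
  rw [pv_merge_countP _ _ (PySem.List.sorted_pairwise _ _) (pv_sorted_set_pairwise_lt filler)]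
  rw [List.Perm.countP_eq _ (PySem.List.sorted_perm (xs := turns.flatMap (fun turn => PySem.Str.split₀ (PySem.Str.lower turn))) (key := fun x => x) (rev := false))]
  have hp : (fun x : String => decide (x ∈ PySem.List.sorted (PySem.Set.ofList filler) (fun x => x) false))
      = fun x => filler.contains x := by
    funext x
    simp [PySem.List.mem_sorted, PySem.Set.mem_ofList]
  rw [hp]
  -- A side: the nested fold is the countP of the flattened tokens
  have hA : ∀ (acc : Int) (ts : List String),
      ts.foldl
        (fun count turn =>
          count + (PySem.Str.split₀ (PySem.Str.lower turn)).foldl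
            (fun s w => if filler.contains w then s + 1 else s) 0) acc
      = acc + ((ts.flatMap (fun turn => PySem.Str.split₀ (PySem.Str.lower turn))).countP
          (fun x => filler.contains x) : Int) := by
    intro acc ts
    induction ts generalizing acc with
    | nil => simp
    | cons t ts ih =>
      rw [List.foldl_cons, ih]
      simp only [List.flatMap_cons, List.countP_append, PySem.List.foldl_if_add_one, zero_add]
      push_cast
      ring
  rw [hA 0 turns, zero_add]

-- ===== VERDICT (by name: the statement is the Claim_ definition above) =====
theorem count_filler_words_spec : Claim_equal_count_filler_words := by
  intro turns filler_words _
  unfold Spec_count_filler_words count_filler_words count_filler_words_alt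
  cases filler_words <;> exact pv_main _ turns
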